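-- pv_equiv track=rewrite | github.com/tyjenkins12/ResearchPaperSummarizer | src/papersum/newsletter/tip_generator.py | _generate_model_type
-- ===== SOURCE A (Python) =====
-- from typing import List, Dict, Optional, Set
--
-- def _generate_model_type(keywords: List[str]) -> str:
--     if 'transformer' in keywords:
--         return 'Transformer'
--     elif any('neural' in k for k in keywords):
--         return 'Neural Network'
--     elif any('tree' in k or 'forest' in k for k in keywords):
--         return 'Tree-based'
--     else:
--         return 'Machine Learning'
-- ===== SOURCE B (Python) =====
-- _LABELS = ['Transformer', 'Neural Network', 'Tree-based', 'Machine Learning']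
--
-- def _rank(k):
--     if k == 'transformer':
--         return 0
--     if 'neural' in k:
--         return 1
--     if 'tree' in k or 'forest' in k:
--         return 2
--     return 3
--
-- def _generate_model_type(keywords):
--     return _LABELS[min(map(_rank, keywords), default=3)]
-- ===== Notes on version B (the rewrite author's own statement) =====
-- stated objective: alternative
-- what changed: Replaces the chain of prioritized membership/any() scans with a map-reduce: each keyword is mapped to a numeric priority rank, the minimum rank is taken, and the result indexes a label table.
import Mathlib
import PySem

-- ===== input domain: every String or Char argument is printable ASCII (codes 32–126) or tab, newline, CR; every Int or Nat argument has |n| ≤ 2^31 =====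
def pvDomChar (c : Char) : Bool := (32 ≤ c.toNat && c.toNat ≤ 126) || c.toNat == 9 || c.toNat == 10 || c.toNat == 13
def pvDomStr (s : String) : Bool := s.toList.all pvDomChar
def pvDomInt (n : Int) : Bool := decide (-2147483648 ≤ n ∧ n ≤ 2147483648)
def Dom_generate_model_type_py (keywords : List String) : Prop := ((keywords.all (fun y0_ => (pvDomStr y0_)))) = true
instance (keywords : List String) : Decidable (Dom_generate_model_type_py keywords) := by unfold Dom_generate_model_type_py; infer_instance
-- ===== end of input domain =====

-- B replaces A's prioritized scan chain with a map-reduce: keywords map to numeric ranks, the minimum rank indexes a label table.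


-- ===== PORT A =====
-- literal transliteration: membership test, then two any() scans, in branch order
def generate_model_type_py (keywords : List String) : String :=
  if keywords.contains "transformer" then "Transformer"
  else if keywords.any (fun k => PySem.Str.isIn "neural" k) then "Neural Network"
  else if keywords.any (fun k => PySem.Str.isIn "tree" k || PySem.Str.isIn "forest" k) then "Tree-based"
  else "Machine Learning"

-- ===== PORT B =====
def pvLabels : List String := ["Transformer", "Neural Network", "Tree-based", "Machine Learning"]

def pvRank (k : String) : Nat :=
  if k == "transformer" then 0
  else if PySem.Str.isIn "neural" k then 1
  else if PySem.Str.isIn "tree" k || PySem.Str.isIn "forest" k then 2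
  else 3

-- min over the mapped ranks (default 3 on empty), then index into the label table
def generate_model_type_py_alt (keywords : List String) : String :=
  pvLabels.getD ((keywords.map pvRank).foldl min 3) "Machine Learning"

-- ===== PRECONDITION & SPEC =====
def Spec_generate_model_type_py (keywords : List String) (out : String) : Prop := out = generate_model_type_py_alt keywords
instance (keywords : List String) (out : String) : Decidable (Spec_generate_model_type_py keywords out) := by unfold Spec_generate_model_type_py; infer_instance

-- ===== CLAIM (what is proved, stated in full; the proofs are below) =====
def Claim_equal_generate_model_type_py : Prop := ∀ (keywords : List String), Dom_generate_model_type_py keywords → Spec_generate_model_type_py keywords (generate_model_type_py keywords)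

-- ===== LEMMAS AND PROOFS =====
-- closed form of the minimum rank of a keyword list
def pvMinRank (l : List String) : Nat :=
  if l.any (fun k => k == "transformer") then 0
  else if l.any (fun k => PySem.Str.isIn "neural" k) then 1
  else if l.any (fun k => PySem.Str.isIn "tree" k || PySem.Str.isIn "forest" k) then 2
  else 3

theorem minRank_cons (x : String) (xs : List String) :
    pvMinRank (x :: xs) = min (pvRank x) (pvMinRank xs) := by
  unfold pvMinRank pvRank
  simp only [List.any_cons]
  by_cases h1 : (x == "transformer") = true <;>
  by_cases h2 : (PySem.Str.isIn "neural" x) = true <;>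
  by_cases h3 : (PySem.Str.isIn "tree" x || PySem.Str.isIn "forest" x) = true <;>
  by_cases g1 : (xs.any fun k => k == "transformer") = true <;>
  by_cases g2 : (xs.any fun k => PySem.Str.isIn "neural" k) = true <;>
  by_cases g3 : (xs.any fun k => PySem.Str.isIn "tree" k || PySem.Str.isIn "forest" k) = true <;>
    simp only [Bool.not_eq_true] at * <;> simp only [h1, h2, h3, g1, g2, g3] <;> decide

theorem minRank_le (l : List String) : pvMinRank l ≤ 3 := by
  unfold pvMinRank; split_ifs <;> omega

theorem foldl_min_rank_gen (l : List String) (a : Nat) (ha : a ≤ 3) :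
    (l.map pvRank).foldl min a = min a (pvMinRank l) := by
  induction l generalizing a with
  | nil => unfold pvMinRank; simp; omega
  | cons x xs ih =>
    simp only [List.map_cons, List.foldl_cons]
    rw [ih (min a (pvRank x)) (by omega), minRank_cons]
    omega

theorem foldl_min_rank (l : List String) :
    (l.map pvRank).foldl min 3 = pvMinRank l := by
  rw [foldl_min_rank_gen l 3 (le_refl 3)]
  have := minRank_le l
  omega

theorem contains_eq_any_transformer (l : List String) :
    l.contains "transformer" = l.any (fun k => k == "transformer") := by
  induction l with
  | nil => rfl
  | cons x xs ih =>
    simp only [List.any_cons, ← ih, List.contains_cons]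
    rw [Bool.eq_iff_iff]
    simp only [Bool.or_eq_true, beq_iff_eq, List.contains_eq_mem, decide_eq_true_eq]
    exact ⟨fun h => h.imp Eq.symm id, fun h => h.imp Eq.symm id⟩

-- ===== VERDICT (by name: the statement is the Claim_ definition above) =====
theorem generate_model_type_py_spec : Claim_equal_generate_model_type_py := by
  intro keywords _
  unfold Spec_generate_model_type_py generate_model_type_py generate_model_type_py_alt
  rw [foldl_min_rank keywords, contains_eq_any_transformer keywords]
  unfold pvMinRank
  split_ifs <;> rfl
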